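-- pv_equiv track=rewrite | github.com/ctynan/advent_of_code | 2022/problems/day_17.py | end_point_exists
-- ===== SOURCE A (Python) =====
-- def end_point_exists(point, point_set):
--     x, y = point
--     if x == 6:
--         return True, [y]
--     else:
--         if (x + 1, y - 1) in point_set:
--             ret, v = end_point_exists((x + 1, y - 1), point_set)
--             if ret is True:
--                 return True, [y-1] + v
--         if (x + 1, y) in point_set:
--             ret, v = end_point_exists((x + 1, y), point_set)
--             if ret is True:
--                 return True, [y] + v
--         if (x + 1, y + 1) in point_set:
--             ret, v = end_point_exists((x + 1, y + 1), point_set)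
--             if ret is True:
--                 return True, [y+1] + v
--     return False, []
-- ===== SOURCE B (Python) =====
-- def end_point_exists(point, point_set):
--     pts = set(point_set)
--     stack = [(point, [])]
--     while stack:
--         (x, y), path = stack.pop()
--         if x == 6:
--             return True, path + [y]
--         for dy in (1, 0, -1):
--             nxt = (x + 1, y + dy)
--             if nxt in pts:
--                 stack.append((nxt, path + [y + dy]))
--     return False, []
-- ===== Notes on version B (the rewrite author's own statement) =====
-- stated objective: alternative
-- what changed: Replaces A's triple-branch recursion with an explicit iterative DFS over a stack of (point, path) entries (children pushed in reverse priority order) and a set built once for membership instead of repeated list scans.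
import Mathlib
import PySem

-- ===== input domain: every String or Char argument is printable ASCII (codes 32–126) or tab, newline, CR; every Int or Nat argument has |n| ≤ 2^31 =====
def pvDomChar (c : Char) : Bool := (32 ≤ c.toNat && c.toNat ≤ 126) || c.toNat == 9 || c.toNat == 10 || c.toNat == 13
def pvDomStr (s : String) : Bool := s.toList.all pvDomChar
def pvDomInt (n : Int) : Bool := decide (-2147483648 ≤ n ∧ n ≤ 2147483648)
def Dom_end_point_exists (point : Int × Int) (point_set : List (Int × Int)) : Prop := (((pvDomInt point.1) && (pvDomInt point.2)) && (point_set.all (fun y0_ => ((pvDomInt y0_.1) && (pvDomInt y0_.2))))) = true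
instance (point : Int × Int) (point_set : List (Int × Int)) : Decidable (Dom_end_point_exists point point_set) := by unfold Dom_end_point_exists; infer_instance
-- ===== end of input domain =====

-- B replaces A's triple-branch recursion by an explicit iterative DFS (stack of
-- (point, path) entries, children pushed in reverse priority order, membership
-- set built once); equivalence of the return values is proved on all inputs.

-- ===== PORT A =====

-- measure used only for termination: number of points strictly to the right of x
def pvMeasA (point_set : List (Int × Int)) (x : Int) : Nat :=
  (point_set.filter (fun p => x < p.1)).length

-- a point at x+1 in the list makes the measure strictly drop (termination of A's recursion)
theorem pvMeasA_lt {point_set : List (Int × Int)} {x y : Int}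
    (h : (x + 1, y) ∈ point_set) : pvMeasA point_set (x + 1) < pvMeasA point_set x := by
  unfold pvMeasA
  have hmono : ∀ l : List (Int × Int),
      (List.filter (fun p => decide (x + 1 < p.1)) l).length ≤
      (List.filter (fun p => decide (x < p.1)) l).length := by
    intro l
    refine List.Sublist.length_le (List.monotone_filter_right l ?_)
    intro p hp; simp only [decide_eq_true_eq] at *; omega
  induction point_set with
  | nil => cases h
  | cons a l ih =>
    simp only [List.filter_cons]
    rcases List.mem_cons.mp h with h1 | h2
    · subst h1
      rw [if_neg (by simp), if_pos (by simp)]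
      exact Nat.lt_succ_of_le (hmono l)
    · have ihl := ih h2
      by_cases hb : (x + 1 : Int) < a.1
      · rw [if_pos (by simpa using hb), if_pos (by simpa using (show x < a.1 by omega))]
        simpa using Nat.succ_lt_succ ihl
      · by_cases hb2 : (x : Int) < a.1
        · rw [if_neg (by simpa using hb), if_pos (by simpa using hb2)]
          simp only [List.length_cons]; omega
        · rw [if_neg (by simpa using hb), if_neg (by simpa using hb2)]
          exact ihl

def end_point_exists (point : Int × Int) (point_set : List (Int × Int)) : Bool × List Int :=
  if point.1 = 6 then (true, [point.2])
  else
    let try1 := if h : (point.1 + 1, point.2 - 1) ∈ point_set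
                then end_point_exists (point.1 + 1, point.2 - 1) point_set else (false, [])
    if try1.1 then (true, (point.2 - 1) :: try1.2)
    else
      let try2 := if h : (point.1 + 1, point.2) ∈ point_set
                  then end_point_exists (point.1 + 1, point.2) point_set else (false, [])
      if try2.1 then (true, point.2 :: try2.2)
      else
        let try3 := if h : (point.1 + 1, point.2 + 1) ∈ point_set
                    then end_point_exists (point.1 + 1, point.2 + 1) point_set else (false, [])
        if try3.1 then (true, (point.2 + 1) :: try3.2)
        else (false, [])
termination_by pvMeasA point_set point.1
decreasing_by
  · exact pvMeasA_lt h
  · exact pvMeasA_lt h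
  · exact pvMeasA_lt h

-- ===== PORT B =====

-- weight of one stack entry; the stack's total weight decreases at every loop step
def pvWeight (pts : List (Int × Int)) (e : (Int × Int) × List Int) : Nat :=
  4 ^ pvMeasA pts e.1.1

theorem pvWeight_pos (pts : List (Int × Int)) (e : (Int × Int) × List Int) :
    0 < pvWeight pts e := Nat.pow_pos (by norm_num)

theorem pvWeight_child {pts : List (Int × Int)} {x y y' : Int} (path path' : List Int)
    (h : (x + 1, y') ∈ pts) :
    4 * pvWeight pts ((x + 1, y'), path') ≤ pvWeight pts ((x, y), path) := by
  unfold pvWeight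
  have hlt := pvMeasA_lt h
  calc 4 * 4 ^ pvMeasA pts (x + 1) = 4 ^ (pvMeasA pts (x + 1) + 1) := by ring
    _ ≤ 4 ^ pvMeasA pts x := Nat.pow_le_pow_right (by norm_num) (by omega)

-- the while loop of Source B: pop an entry, return at x = 6, else push the three
-- candidate children (dy = +1, 0, -1, so that y-1 is popped first)
def pvLoop (pts : List (Int × Int)) (stack : List ((Int × Int) × List Int)) : Bool × List Int :=
  match stack with
  | [] => (false, [])
  | ((x, y), path) :: rest =>
    if x = 6 then (true, path ++ [y])
    else
      let s1 := if h : (x + 1, y + 1) ∈ pts then ((x + 1, y + 1), path ++ [y + 1]) :: rest else rest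
      let s2 := if h : (x + 1, y) ∈ pts then ((x + 1, y), path ++ [y]) :: s1 else s1
      let s3 := if h : (x + 1, y - 1) ∈ pts then ((x + 1, y - 1), path ++ [y - 1]) :: s2 else s2
      pvLoop pts s3
termination_by (stack.map (pvWeight pts)).sum
decreasing_by
  simp only [List.map_cons, List.sum_cons]
  have hw := pvWeight_pos pts ((x, y), path)
  split
  · rename_i h3
    have b3 := pvWeight_child (pts := pts) (y := y) path (path ++ [y - 1]) (by simpa using h3)
    split
    · rename_i h2
      have b2 := pvWeight_child (pts := pts) (y := y) path (path ++ [y]) h2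
      split
      · rename_i h1
        have b1 := pvWeight_child (pts := pts) (y := y) path (path ++ [y + 1]) h1
        simp only [List.map_cons, List.sum_cons]; omega
      · simp only [List.map_cons, List.sum_cons]; omega
    · split
      · rename_i h1
        have b1 := pvWeight_child (pts := pts) (y := y) path (path ++ [y + 1]) h1
        simp only [List.map_cons, List.sum_cons]; omega
      · simp only [List.map_cons, List.sum_cons]; omega
  · split
    · rename_i h2
      have b2 := pvWeight_child (pts := pts) (y := y) path (path ++ [y]) h2
      split
      · rename_i h1
        have b1 := pvWeight_child (pts := pts) (y := y) path (path ++ [y + 1]) h1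
        simp only [List.map_cons, List.sum_cons]; omega
      · simp only [List.map_cons, List.sum_cons]; omega
    · split
      · rename_i h1
        have b1 := pvWeight_child (pts := pts) (y := y) path (path ++ [y + 1]) h1
        simp only [List.map_cons, List.sum_cons]; omega
      · omega

def end_point_exists_alt (point : Int × Int) (point_set : List (Int × Int)) : Bool × List Int :=
  let pts := PySem.Set.ofList point_set
  pvLoop pts [(point, [])]

-- ===== PRECONDITION & SPEC =====
def Spec_end_point_exists (point : Int × Int) (point_set : List (Int × Int)) (out : Bool × List Int) : Prop := out = end_point_exists_alt point point_set
instance (point : Int × Int) (point_set : List (Int × Int)) (out : Bool × List Int) : Decidable (Spec_end_point_exists point point_set out) := by unfold Spec_end_point_exists; infer_instance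

-- ===== CLAIM (what is proved, stated in full; the proofs are below) =====
def Claim_equal_end_point_exists : Prop := ∀ (point : Int × Int) (point_set : List (Int × Int)), Dom_end_point_exists point point_set → Spec_end_point_exists point point_set (end_point_exists point point_set)

-- ===== LEMMAS AND PROOFS =====

-- A's false results are exactly (false, [])
theorem epe_false (point : Int × Int) (point_set : List (Int × Int))
    (h : (end_point_exists point point_set).1 = false) :
    end_point_exists point point_set = (false, []) := by
  rw [end_point_exists] at h ⊢
  simp only [] at h ⊢
  split_ifs at h ⊢ <;> simp_all

-- the loop invariant: processing a stack entry behaves like A's recursive call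
theorem pvLoop_step (point_set : List (Int × Int)) :
    ∀ n (p : Int × Int), pvMeasA point_set p.1 < n → ∀ (path : List Int) rest,
      pvLoop (PySem.Set.ofList point_set) ((p, path) :: rest) =
        if (end_point_exists p point_set).1 then
          (true, path ++ (end_point_exists p point_set).2)
        else pvLoop (PySem.Set.ofList point_set) rest := by
  intro n
  induction n with
  | zero => intro p h; omega
  | succ n ih =>
    intro p hn path rest
    obtain ⟨x, y⟩ := p
    have hn' : pvMeasA point_set x < n + 1 := hn
    have hmem : ∀ q : Int × Int, q ∈ PySem.Set.ofList point_set ↔ q ∈ point_set :=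
      fun q => PySem.Set.mem_ofList point_set q
    have key : ∀ (cx cy : Int), pvMeasA point_set cx < n → ∀ (path0 : List Int) rest0,
        pvLoop (PySem.Set.ofList point_set) (((cx, cy), path0 ++ [cy]) :: rest0) =
          if (end_point_exists (cx, cy) point_set).1 then
            (true, path0 ++ cy :: (end_point_exists (cx, cy) point_set).2)
          else pvLoop (PySem.Set.ofList point_set) rest0 := by
      intro cx cy hc path0 rest0
      rw [ih (cx, cy) hc]
      rcases hfc : end_point_exists (cx, cy) point_set with ⟨b, v⟩
      cases b <;> simp
    by_cases hx : x = 6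
    · subst hx
      rw [pvLoop, end_point_exists]
      simp
    · rw [pvLoop, end_point_exists]
      dsimp only
      rw [if_neg hx, if_neg hx]
      by_cases h1 : (x + 1, y - 1) ∈ point_set
      case pos =>
        rw [dif_pos ((hmem _).mpr h1), dif_pos h1,
            key (x + 1) (y - 1) (by have := pvMeasA_lt h1; omega)]
        rcases hfc1 : end_point_exists (x + 1, y - 1) point_set with ⟨b1, v1⟩
        cases b1
        case true => simp
        case false =>
          dsimp only
          simp only [Bool.false_eq_true, if_false]
          by_cases h2 : (x + 1, y) ∈ point_set
          case pos =>
            rw [dif_pos ((hmem _).mpr h2), dif_pos h2,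
                key (x + 1) y (by have := pvMeasA_lt h2; omega)]
            rcases hfc2 : end_point_exists (x + 1, y) point_set with ⟨b2, v2⟩
            cases b2
            case true => simp
            case false =>
              dsimp only
              simp only [Bool.false_eq_true, if_false]
              by_cases h3 : (x + 1, y + 1) ∈ point_set
              case pos =>
                rw [dif_pos ((hmem _).mpr h3), dif_pos h3,
                    key (x + 1) (y + 1) (by have := pvMeasA_lt h3; omega)]
                rcases hfc3 : end_point_exists (x + 1, y + 1) point_set with ⟨b3, v3⟩
                cases b3 <;> simp
              case neg =>
                rw [dif_neg (fun hh => h3 ((hmem _).mp hh)), dif_neg h3]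
                simp
          case neg =>
            rw [dif_neg (fun hh => h2 ((hmem _).mp hh)), dif_neg h2]
            dsimp only
            simp only [Bool.false_eq_true, if_false]
            by_cases h3 : (x + 1, y + 1) ∈ point_set
            case pos =>
              rw [dif_pos ((hmem _).mpr h3), dif_pos h3,
                  key (x + 1) (y + 1) (by have := pvMeasA_lt h3; omega)]
              rcases hfc3 : end_point_exists (x + 1, y + 1) point_set with ⟨b3, v3⟩
              cases b3 <;> simp
            case neg =>
              rw [dif_neg (fun hh => h3 ((hmem _).mp hh)), dif_neg h3]
              simp
      case neg =>
        rw [dif_neg (fun hh => h1 ((hmem _).mp hh)), dif_neg h1]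
        dsimp only
        simp only [Bool.false_eq_true, if_false]
        by_cases h2 : (x + 1, y) ∈ point_set
        case pos =>
          rw [dif_pos ((hmem _).mpr h2), dif_pos h2,
              key (x + 1) y (by have := pvMeasA_lt h2; omega)]
          rcases hfc2 : end_point_exists (x + 1, y) point_set with ⟨b2, v2⟩
          cases b2
          case true => simp
          case false =>
            dsimp only
            simp only [Bool.false_eq_true, if_false]
            by_cases h3 : (x + 1, y + 1) ∈ point_set
            case pos =>
              rw [dif_pos ((hmem _).mpr h3), dif_pos h3,
                  key (x + 1) (y + 1) (by have := pvMeasA_lt h3; omega)]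
              rcases hfc3 : end_point_exists (x + 1, y + 1) point_set with ⟨b3, v3⟩
              cases b3 <;> simp
            case neg =>
              rw [dif_neg (fun hh => h3 ((hmem _).mp hh)), dif_neg h3]
              simp
        case neg =>
          rw [dif_neg (fun hh => h2 ((hmem _).mp hh)), dif_neg h2]
          dsimp only
          simp only [Bool.false_eq_true, if_false]
          by_cases h3 : (x + 1, y + 1) ∈ point_set
          case pos =>
            rw [dif_pos ((hmem _).mpr h3), dif_pos h3,
                key (x + 1) (y + 1) (by have := pvMeasA_lt h3; omega)]
            rcases hfc3 : end_point_exists (x + 1, y + 1) point_set with ⟨b3, v3⟩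
            cases b3 <;> simp
          case neg =>
            rw [dif_neg (fun hh => h3 ((hmem _).mp hh)), dif_neg h3]
            simp

-- ===== VERDICT (by name: the statement is the Claim_ definition above) =====
theorem end_point_exists_spec : Claim_equal_end_point_exists := by
  intro point point_set _
  unfold Spec_end_point_exists end_point_exists_alt
  rw [pvLoop_step point_set (pvMeasA point_set point.1 + 1) point (by omega) [] []]
  rcases hf : end_point_exists point point_set with ⟨b, v⟩
  cases b
  · have := epe_false point point_set (by rw [hf])
    rw [hf] at this
    simp [pvLoop, this]
  · simp
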